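-- pv_equiv track=rewrite | github.com/g1dramcs/olympics | technocup/1st stage/taskC.py | count_beautiful_lengths
-- ===== SOURCE A (Python) =====
-- def count_divisors(n):
--     if n == 1:
--         return 1
--     count = 0
--     for i in range(1, int(n**0.5) + 1):
--         if n % i == 0:
--             count += 1
--             if i != n // i:
--                 count += 1
--     return count
--
-- def count_beautiful_lengths(t, d):
--     low = max(1, t - d)
--     high = t + d
--     beautiful_count = 0
--
--     for length in range(low, high + 1):
--         if count_divisors(length) <= 3:
--             beautiful_count += 1
--
--     return beautiful_count
-- ===== SOURCE B (Python) =====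
-- def _is_beautiful(n):
--     # n has at most 3 divisors iff n == 1, n is prime, or n is a prime squared:
--     # find the smallest divisor p >= 2 with p*p <= n; if none, n is prime;
--     # otherwise n qualifies exactly when n == p*p.
--     if n == 1:
--         return True
--     p = 2
--     while p * p <= n:
--         if n % p == 0:
--             return n == p * p
--         p += 1
--     return True
--
-- def count_beautiful_lengths(t, d):
--     low = max(1, t - d)
--     high = t + d
--     return sum(1 for n in range(low, high + 1) if _is_beautiful(n))
-- ===== Notes on version B (the rewrite author's own statement) =====
-- stated objective: faster
-- what changed: A counts all divisors of each number by scanning every i up to sqrt(n); B instead stops at the smallest divisor p >= 2 and decides 'at most 3 divisors' as n == 1, n prime (no such p with p*p <= n), or n == p*p, and totals with a sum over a generator instead of an accumulator loop.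
import Mathlib
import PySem

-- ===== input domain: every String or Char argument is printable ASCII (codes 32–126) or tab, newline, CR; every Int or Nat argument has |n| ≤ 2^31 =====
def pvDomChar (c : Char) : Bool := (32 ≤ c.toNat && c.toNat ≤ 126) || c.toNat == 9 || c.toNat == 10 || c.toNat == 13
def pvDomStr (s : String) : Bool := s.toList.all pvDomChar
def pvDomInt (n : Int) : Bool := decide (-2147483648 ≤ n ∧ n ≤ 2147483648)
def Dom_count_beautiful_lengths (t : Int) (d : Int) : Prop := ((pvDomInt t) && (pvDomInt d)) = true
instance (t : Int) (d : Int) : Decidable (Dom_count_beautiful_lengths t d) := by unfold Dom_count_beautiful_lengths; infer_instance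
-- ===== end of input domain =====

-- B replaces A's full per-number divisor count by an early-exit smallest-factor test
-- (n has ≤ 3 divisors iff n == 1 or n == p*p for its smallest divisor p ≥ 2 or no such
-- divisor with p*p ≤ n exists); measured faster by a constant factor.


-- ===== PORT A =====
-- int(n**0.5) is ported as Nat.sqrt (floor square root): exact for every n this function
-- is called on (1 ≤ n ≤ 2^32, where Python's float sqrt never crosses an integer boundary).
def count_divisors (n : Int) : Int :=
  if n == 1 then 1
  else
    (PySem.List.pyRange 1 (((Nat.sqrt n.toNat : Int)) + 1) 1).foldl
      (fun count i =>
        if PySem.Int.mod n i == 0 then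
          let count := count + 1
          if i != PySem.Int.floordiv n i then count + 1 else count
        else count) 0

def count_beautiful_lengths (t : Int) (d : Int) : Int :=
  let low := max 1 (t - d)
  let high := t + d
  (PySem.List.pyRange low (high + 1) 1).foldl
    (fun beautiful_count length =>
      if count_divisors length ≤ 3 then beautiful_count + 1 else beautiful_count) 0

-- ===== PORT B =====
-- B's while loop: scan p = 2, 3, … while p*p ≤ n; at the first divisor return n == p*p.
def isBeautifulLoop (n : Int) (p : Int) : Bool :=
  if p * p ≤ n then
    if PySem.Int.mod n p == 0 then n == p * p
    else isBeautifulLoop n (p + 1)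
  else true
termination_by (n + 1 - p).toNat
decreasing_by
  rename_i h
  have hp : p ≤ n := by nlinarith [h, sq_nonneg p]
  omega

def is_beautiful (n : Int) : Bool :=
  if n == 1 then true else isBeautifulLoop n 2

def count_beautiful_lengths_alt (t : Int) (d : Int) : Int :=
  let low := max 1 (t - d)
  let high := t + d
  ((PySem.List.pyRange low (high + 1) 1).countP (fun n => is_beautiful n) : Int)

-- ===== PRECONDITION & SPEC =====
def Spec_count_beautiful_lengths (t : Int) (d : Int) (out : Int) : Prop := out = count_beautiful_lengths_alt t d
instance (t : Int) (d : Int) (out : Int) : Decidable (Spec_count_beautiful_lengths t d out) := by unfold Spec_count_beautiful_lengths; infer_instance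

-- ===== CLAIM (what is proved, stated in full; the proofs are below) =====
def Claim_equal_count_beautiful_lengths : Prop := ∀ (t : Int) (d : Int), Dom_count_beautiful_lengths t d → Spec_count_beautiful_lengths t d (count_beautiful_lengths t d)

-- ===== LEMMAS AND PROOFS =====

-- per-element contribution of A's divisor-counting loop
def gDiv (n i : Int) : Int :=
  if PySem.Int.mod n i == 0 then (if i != PySem.Int.floordiv n i then 2 else 1) else 0

theorem gDiv_nonneg (n i : Int) : 0 ≤ gDiv n i := by
  unfold gDiv; split_ifs <;> norm_num

-- the tail sum of A's contributions from p up to the square root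
def tailSum (n p : Int) : Int :=
  ((PySem.List.pyRange p (((Nat.sqrt n.toNat : Int)) + 1) 1).map (gDiv n)).sum

theorem tailSum_nonneg (n p : Int) : 0 ≤ tailSum n p := by
  unfold tailSum
  apply List.sum_nonneg
  intro x hx
  rcases List.mem_map.mp hx with ⟨i, _, rfl⟩
  exact gDiv_nonneg n i

-- A's loop computes the sum of contributions
theorem count_divisors_eq_sum (n : Int) (hn : n ≠ 1) :
    count_divisors n = tailSum n 1 := by
  unfold count_divisors tailSum
  rw [if_neg (by simpa using hn)]
  have hbody : (fun (count i : Int) =>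
      if PySem.Int.mod n i == 0 then
        (let count := count + 1;
         if i != PySem.Int.floordiv n i then count + 1 else count)
      else count) = fun (acc x : Int) => acc + gDiv n x := by
    funext c i
    unfold gDiv
    split_ifs <;> simp <;> ring
  rw [hbody, PySem.List.foldl_add]
  simp

-- bracket: for 1 ≤ p and 0 ≤ n, p ≤ isqrt n ↔ p*p ≤ n
theorem le_sqrt_iff (n p : Int) (hn : 0 ≤ n) (hp : 1 ≤ p) :
    p ≤ ((Nat.sqrt n.toNat : Int)) ↔ p * p ≤ n := by
  have hpn : (p.toNat : Int) = p := by omega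
  have hnn : (n.toNat : Int) = n := by omega
  constructor
  · intro h
    have h1 : p.toNat ≤ Nat.sqrt n.toNat := by omega
    have h2 : ((p.toNat * p.toNat : Nat) : Int) ≤ ((n.toNat : Nat) : Int) :=
      Int.ofNat_le.mpr (Nat.le_sqrt.mp h1)
    push_cast at h2
    rw [hpn, hnn] at h2
    exact h2
  · intro h
    have h2 : p.toNat * p.toNat ≤ n.toNat := by
      have : ((p.toNat * p.toNat : Nat) : Int) ≤ ((n.toNat : Nat) : Int) := by
        push_cast
        rw [hpn, hnn]
        exact h
      exact_mod_cast this
    have := Nat.le_sqrt.mpr h2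
    omega

-- if n = p*p with 0 ≤ p then isqrt n = p
theorem sqrt_of_sq (n p : Int) (hp : 0 ≤ p) (h : n = p * p) :
    ((Nat.sqrt n.toNat : Int)) = p := by
  have hpn : (p.toNat : Int) = p := by omega
  have he : n.toNat = p.toNat * p.toNat := by
    have h2 : ((p.toNat * p.toNat : Nat) : Int) = n := by
      push_cast
      rw [hpn]
      exact h.symm
    omega
  rw [he]
  have hsq : Nat.sqrt (p.toNat * p.toNat) = p.toNat := by
    have := Nat.sqrt_eq' p.toNat
    rwa [pow_two] at this
  rw [hsq, hpn]

-- core loop characterisation: B's early-exit scan from p agrees with "tail contributions ≤ 1"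
theorem loop_iff (n : Int) (hn : 2 ≤ n) :
    ∀ (k : Nat) (p : Int), (n + 1 - p).toNat = k → 2 ≤ p →
      (isBeautifulLoop n p = true ↔ tailSum n p ≤ 1) := by
  intro k
  induction k using Nat.strong_induction_on with
  | _ k IH =>
    intro p hk hp
    rw [isBeautifulLoop]
    by_cases h : p * p ≤ n
    · rw [if_pos h]
      have hps : p ≤ ((Nat.sqrt n.toNat : Int)) := (le_sqrt_iff n p (by omega) (by omega)).mpr h
      have hcons : PySem.List.pyRange p (((Nat.sqrt n.toNat : Int)) + 1) 1
          = p :: PySem.List.pyRange (p + 1) (((Nat.sqrt n.toNat : Int)) + 1) 1 :=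
        PySem.List.pyRange_one_cons (by omega)
      have hsplit : tailSum n p = gDiv n p + tailSum n (p + 1) := by
        unfold tailSum
        rw [hcons]
        simp
      by_cases hdvd : PySem.Int.mod n p = 0
      · rw [if_pos (by simp [hdvd])]
        have hpdvd : p ∣ n := (PySem.Int.mod_eq_zero_iff_dvd n p).mp hdvd
        by_cases hsq : n = p * p
        · have hfd : PySem.Int.floordiv n p = p := by
            rw [PySem.Int.floordiv_eq_ediv_of_pos (by omega), hsq]
            exact Int.mul_ediv_cancel p (by omega)
          have hgp : gDiv n p = 1 := by
            unfold gDiv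
            rw [if_pos (by simp [hdvd]), hfd]
            simp
          have hsqr : ((Nat.sqrt n.toNat : Int)) = p := sqrt_of_sq n p (by omega) hsq
          have htail : tailSum n (p + 1) = 0 := by
            unfold tailSum
            rw [hsqr, PySem.List.pyRange_one_eq_nil (by omega)]
            simp
          rw [hsplit, hgp, htail]
          simp [hsq]
        · have hfd : PySem.Int.floordiv n p ≠ p := by
            intro hfe
            apply hsq
            rw [PySem.Int.floordiv_eq_ediv_of_pos (by omega)] at hfe
            have hc := Int.ediv_mul_cancel hpdvd
            rw [hfe] at hc
            linarith
          have hgp : gDiv n p = 2 := by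
            unfold gDiv
            rw [if_pos (by simp [hdvd])]
            have hfd' : p ≠ PySem.Int.floordiv n p := fun hh => hfd hh.symm
            simp [hfd']
          have h2 := tailSum_nonneg n (p + 1)
          rw [hsplit, hgp]
          simp only [beq_iff_eq]
          constructor
          · intro hb
            exact absurd hb hsq
          · intro hle
            omega
      · rw [if_neg (by simp [hdvd])]
        have hgp : gDiv n p = 0 := by
          unfold gDiv
          rw [if_neg (by simp [hdvd])]
        have hpn : p ≤ n := by nlinarith
        have hrec := IH (n + 1 - (p + 1)).toNat (by omega) (p + 1) rfl (by omega)
        rw [hsplit, hgp, hrec]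
        constructor <;> intro <;> omega
    · rw [if_neg h]
      have hlt : ((Nat.sqrt n.toNat : Int)) < p := by
        by_contra hle
        exact h ((le_sqrt_iff n p (by omega) (by omega)).mp (not_lt.mp hle))
      have htail : tailSum n p = 0 := by
        unfold tailSum
        rw [PySem.List.pyRange_one_eq_nil (by omega)]
        simp
      simp [htail]

-- pointwise agreement of the two beauty tests
theorem beautiful_iff (n : Int) (hn : 1 ≤ n) :
    decide (count_divisors n ≤ 3) = is_beautiful n := by
  by_cases h1 : n = 1
  · subst h1
    decide
  · have hn2 : 2 ≤ n := by omega
    have hrw := count_divisors_eq_sum n h1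
    have hs1 : (1 : Int) ≤ ((Nat.sqrt n.toNat : Int)) :=
      (le_sqrt_iff n 1 (by omega) le_rfl).mpr (by omega)
    have hcons : PySem.List.pyRange 1 (((Nat.sqrt n.toNat : Int)) + 1) 1
        = 1 :: PySem.List.pyRange 2 (((Nat.sqrt n.toNat : Int)) + 1) 1 :=
      PySem.List.pyRange_one_cons (by omega)
    have hg1 : gDiv n 1 = 2 := by
      unfold gDiv
      have hm : PySem.Int.mod n 1 = 0 := by
        rw [PySem.Int.mod_eq_emod_of_pos (by norm_num)]
        simp
      have hf : PySem.Int.floordiv n 1 = n := by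
        rw [PySem.Int.floordiv_eq_ediv_of_pos (by norm_num)]
        simp
      rw [if_pos (by rw [hm]; simp), hf]
      have hne : (1 : Int) ≠ n := by omega
      simp [hne]
    have hsum : tailSum n 1 = 2 + tailSum n 2 := by
      unfold tailSum
      rw [hcons]
      simp [hg1]
    have hloop := loop_iff n hn2 (n + 1 - 2).toNat 2 rfl le_rfl
    have hb : is_beautiful n = isBeautifulLoop n 2 := by
      unfold is_beautiful
      rw [if_neg (by simp [h1])]
    rw [hrw, hsum, hb]
    by_cases ht : tailSum n 2 ≤ 1
    · rw [decide_eq_true (by omega), hloop.mpr ht]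
    · rw [decide_eq_false (by omega)]
      cases hbl : isBeautifulLoop n 2
      · rfl
      · exact absurd (hloop.mp hbl) ht

theorem count_beautiful_lengths_spec : Claim_equal_count_beautiful_lengths := by
  intro t d _
  unfold Spec_count_beautiful_lengths count_beautiful_lengths count_beautiful_lengths_alt
  have hbody : (fun (beautiful_count length : Int) =>
      if count_divisors length ≤ 3 then beautiful_count + 1 else beautiful_count)
      = fun (acc x : Int) =>
          acc + (if (decide (count_divisors x ≤ 3)) = true then (1 : Int) else 0) := by
    funext c x
    split_ifs with hc hd hd <;> simp_all <;> omega
  rw [hbody, PySem.List.foldl_add,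
    PySem.List.sum_map_ite_one_zero (fun x => decide (count_divisors x ≤ 3))]
  have hcp : List.countP (fun x => decide (count_divisors x ≤ 3))
        (PySem.List.pyRange (max 1 (t - d)) (t + d + 1) 1)
      = List.countP (fun n => is_beautiful n)
        (PySem.List.pyRange (max 1 (t - d)) (t + d + 1) 1) := by
    apply List.countP_congr
    intro x hx
    have hx1 : (1 : Int) ≤ x := by
      have := (PySem.List.mem_pyRange_one.mp hx).1
      omega
    rw [beautiful_iff x hx1]
  rw [hcp]
  simp
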